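-- pv_equiv track=rewrite | github.com/HadjSassi/geekshack3 | scode/teamRAM/prob18/main.py | is_beautiful
-- ===== SOURCE A (Python) =====
-- def is_beautiful(l):
--     c=1
--     for j in range(1,len(l)):
--         if l[j]!=l[j-1]:
--             temp=l[j-1]
--             for x in range(j+1,len(l)):
--                 if l[x]==temp:
--                     c=0
--                     break
--     return(c)
-- ===== SOURCE B (Python) =====
-- def is_beautiful(l):
--     # One pass: when a run of equal values ends, its value becomes "closed";
--     # seeing a closed value start a new run means the value is non-contiguous.
--     if not l:
--         return 1
--     closed = set()
--     prev = l[0]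
--     for x in l[1:]:
--         if x != prev:
--             closed.add(prev)
--             if x in closed:
--                 return 0
--         prev = x
--     return 1
-- ===== Notes on version B (the rewrite author's own statement) =====
-- stated objective: faster
-- what changed: Replaced the nested rescan of the whole suffix at every run boundary by a single left-to-right pass that maintains a set of already-closed run values and fails as soon as a new run starts with a closed value.
import Mathlib
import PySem

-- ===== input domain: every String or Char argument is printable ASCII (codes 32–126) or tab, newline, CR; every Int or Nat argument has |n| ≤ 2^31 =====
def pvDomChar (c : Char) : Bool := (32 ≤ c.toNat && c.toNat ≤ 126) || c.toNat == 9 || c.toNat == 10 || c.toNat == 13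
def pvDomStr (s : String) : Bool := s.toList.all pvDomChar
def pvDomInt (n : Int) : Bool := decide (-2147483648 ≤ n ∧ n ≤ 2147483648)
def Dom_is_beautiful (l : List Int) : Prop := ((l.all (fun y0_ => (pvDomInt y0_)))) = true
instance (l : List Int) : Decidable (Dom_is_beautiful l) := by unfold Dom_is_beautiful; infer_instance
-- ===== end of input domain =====

-- B replaces A's quadratic rescan of the suffix at every run boundary by a
-- single pass carrying a set of already-closed run values (objective: faster).

-- ===== PORT A =====
-- literal transliteration of A: outer loop over j in range(1, len(l)),
-- the inner 'for x … if l[x]==temp: c=0; break' is the any-test over range(j+1, len(l))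
def is_beautiful (l : List Int) : Int :=
  (PySem.List.pyRange 1 (l.length : Int) 1).foldl
    (fun c j =>
      if PySem.List.pyGetD l j 0 ≠ PySem.List.pyGetD l (j-1) 0 then
        let temp := PySem.List.pyGetD l (j-1) 0
        if (PySem.List.pyRange (j+1) (l.length : Int) 1).any
            (fun x => PySem.List.pyGetD l x 0 == temp) then 0 else c
      else c) 1

-- ===== PORT B =====
-- transliteration of Source B: 'prev' and the loop over l[1:] become structural recursion
def altGo (prev : Int) (rest : List Int) (closed : PySem.Set Int) : Int :=
  match rest with
  | [] => 1
  | x :: xs =>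
    if x ≠ prev then
      let closed' := PySem.Set.add closed prev
      if PySem.Set.contains closed' x then 0 else altGo x xs closed'
    else altGo x xs closed

def is_beautiful_alt (l : List Int) : Int :=
  match l with
  | [] => 1
  | x :: xs => altGo x xs PySem.Set.empty

-- ===== PRECONDITION & SPEC =====
def Spec_is_beautiful (l : List Int) (out : Int) : Prop := out = is_beautiful_alt l
instance (l : List Int) (out : Int) : Decidable (Spec_is_beautiful l out) := by unfold Spec_is_beautiful; infer_instance

-- ===== CLAIM (what is proved, stated in full; the proofs are below) =====
def Claim_equal_is_beautiful : Prop := ∀ (l : List Int), Dom_is_beautiful l → Spec_is_beautiful l (is_beautiful l)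

-- ===== LEMMAS AND PROOFS =====

-- 'some run's value reappears strictly after the run ends', read off the suffix structure
def badA : List Int → Bool
  | a :: b :: rest => (decide (b ≠ a) && rest.any (· == a)) || badA (b :: rest)
  | _ => false

-- 'v occurs in prev::rest at a position where the previous element differs' (a run start)
def oac (v : Int) : Int → List Int → Bool
  | _, [] => false
  | prev, x :: xs => (decide (x ≠ prev) && (x == v)) || oac v x xs

lemma oac_iff_mem (v : Int) (xs : List Int) : ∀ x : Int, v ≠ x → (oac v x xs = true ↔ v ∈ xs) := by
  induction xs with
  | nil => intro x _; simp [oac]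
  | cons y ys ih =>
    intro x hvx
    simp only [oac, Bool.or_eq_true, Bool.and_eq_true, decide_eq_true_eq, beq_iff_eq,
      List.mem_cons]
    by_cases hyv : y = v
    · subst hyv
      constructor
      · intro _; exact Or.inl rfl
      · intro _; exact Or.inl ⟨hvx, rfl⟩
    · rw [ih y (fun h => hyv h.symm)]
      constructor
      · rintro (⟨_, rfl⟩ | h)
        · exact absurd rfl hyv
        · exact Or.inr h
      · rintro (rfl | h)
        · exact absurd rfl hyv
        · exact Or.inr h

lemma foldl_absorb_zero (p : Int → Bool) (js : List Int) :
    ∀ c : Int, js.foldl (fun c j => if p j then 0 else c) c = if js.any p then 0 else c := by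
  induction js with
  | nil => intro c; simp
  | cons j js ih =>
    intro c
    by_cases h : p j = true <;> simp [List.foldl_cons, h, ih]

lemma anyRange_eq_badA (l : List Int) :
    ∀ k i : Nat, l.length - i = k →
    ((PySem.List.pyRange ((i : Int) + 1) (l.length : Int) 1).any
      (fun j => decide (PySem.List.pyGetD l j 0 ≠ PySem.List.pyGetD l (j-1) 0) &&
        (PySem.List.pyRange (j+1) (l.length : Int) 1).any
          (fun x => PySem.List.pyGetD l x 0 == PySem.List.pyGetD l (j-1) 0)))
    = badA (l.drop i) := by
  intro k
  induction k with
  | zero =>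
    intro i hi
    have hle : l.length ≤ i := by omega
    rw [PySem.List.pyRange_one_eq_nil (by exact_mod_cast by omega), List.drop_eq_nil_of_le hle]
    simp [badA]
  | succ k ih =>
    intro i hi
    have hilt : i < l.length := by omega
    by_cases hend : i + 1 = l.length
    · -- last element: empty range, singleton suffix
      rw [PySem.List.pyRange_one_eq_nil (by exact_mod_cast by omega)]
      rw [List.drop_eq_getElem_cons hilt, List.drop_eq_nil_of_le (by omega)]
      simp [badA]
    · have hlt : i + 1 < l.length := by omega
      rw [PySem.List.pyRange_one_cons (by exact_mod_cast hlt), List.any_cons]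
      have hrec : ((i : Int) + 1) + 1 = ((i + 1 : Nat) : Int) + 1 := by push_cast; ring
      rw [hrec, ih (i+1) (by omega)]
      -- head predicate at j = i+1
      have h1 : ((i : Int) + 1) - 1 = ((i : Nat) : Int) := by ring
      have hgj : PySem.List.pyGetD l ((i : Int) + 1) 0 = l[i+1] := by
        have : ((i : Int) + 1) = ((i + 1 : Nat) : Int) := by push_cast; ring
        rw [this, PySem.List.pyGetD_natCast, List.getD_eq_getElem l 0 hlt]
      have hgi : PySem.List.pyGetD l (((i : Int) + 1) - 1) 0 = l[i] := by
        rw [h1, PySem.List.pyGetD_natCast, List.getD_eq_getElem l 0 hilt]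
      have hinner :
          (PySem.List.pyRange (((i+1 : Nat) : Int) + 1) (l.length : Int) 1).any
            (fun x => PySem.List.pyGetD l x 0 == l[i])
          = (l.drop (i+2)).any (· == l[i]) := by
        have hmap := PySem.List.map_pyGetD_pyRange' (xs := l) (a := ((i+1 : Nat) : Int) + 1)
          (d := 0) (by positivity)
        have htn : ((((i+1 : Nat)) : Int) + 1).toNat = i + 2 := by omega
        rw [htn] at hmap
        rw [← hmap, List.any_map]
        rfl
      rw [hgj, hgi, hinner]
      -- unfold badA on the structured suffix
      rw [List.drop_eq_getElem_cons hilt, List.drop_eq_getElem_cons hlt]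
      have h22 : i + 1 + 1 = i + 2 := by omega
      rw [h22]
      simp [badA]

lemma A_eq_badA (l : List Int) : is_beautiful l = if badA l then 0 else 1 := by
  unfold is_beautiful
  have hcongr := PySem.List.foldl_congr_mem
    (l := PySem.List.pyRange 1 (l.length : Int) 1) (init := (1 : Int))
    (f := fun c j =>
      if PySem.List.pyGetD l j 0 ≠ PySem.List.pyGetD l (j-1) 0 then
        let temp := PySem.List.pyGetD l (j-1) 0
        if (PySem.List.pyRange (j+1) (l.length : Int) 1).any
            (fun x => PySem.List.pyGetD l x 0 == temp) then 0 else c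
      else c)
    (g := fun c j =>
      if (decide (PySem.List.pyGetD l j 0 ≠ PySem.List.pyGetD l (j-1) 0) &&
        (PySem.List.pyRange (j+1) (l.length : Int) 1).any
          (fun x => PySem.List.pyGetD l x 0 == PySem.List.pyGetD l (j-1) 0)) then 0 else c)
    (by
      intro acc j _
      by_cases h : PySem.List.pyGetD l j 0 ≠ PySem.List.pyGetD l (j-1) 0
      · simp only [if_pos h, decide_eq_true h, Bool.true_and]
      · simp only [if_neg h, decide_eq_false h, Bool.false_and, Bool.false_eq_true, if_false])
  rw [hcongr, foldl_absorb_zero]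
  have h3 := anyRange_eq_badA l l.length 0 (by omega)
  simp only [Nat.cast_zero, zero_add, List.drop_zero] at h3
  rw [h3]

lemma altGo_eq (rest : List Int) :
    ∀ (prev : Int) (closed : PySem.Set Int),
    altGo prev rest closed =
      if (badA (prev :: rest) || closed.any (fun v => oac v prev rest)) then 0 else 1 := by
  induction rest with
  | nil => intro prev closed; simp [altGo, badA, oac]
  | cons x xs ih =>
    intro prev closed
    by_cases hxp : x ≠ prev
    · have hmem : oac prev x xs = true ↔ prev ∈ xs :=
        oac_iff_mem prev xs x (fun h => hxp h.symm)
      have key :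
        (PySem.Set.contains (PySem.Set.add closed prev) x
          || (badA (x :: xs) || (PySem.Set.add closed prev).any (fun v => oac v x xs)))
        = (badA (prev :: x :: xs) || closed.any (fun v => oac v prev (x :: xs))) := by
        rw [Bool.eq_iff_iff]
        simp only [badA, oac, Bool.or_eq_true, Bool.and_eq_true, List.any_eq_true,
          decide_eq_true_eq, beq_iff_eq, PySem.Set.contains_iff, PySem.Set.mem_add]
        constructor <;> intro h <;> aesop
      have halt : altGo prev (x :: xs) closed =
          if PySem.Set.contains (PySem.Set.add closed prev) x then 0
          else altGo x xs (PySem.Set.add closed prev) := by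
        rw [show altGo prev (x :: xs) closed =
            (if x ≠ prev then
              (if PySem.Set.contains (PySem.Set.add closed prev) x then 0
               else altGo x xs (PySem.Set.add closed prev))
             else altGo x xs closed) from rfl, if_pos hxp]
      rw [halt, ih x (PySem.Set.add closed prev), ← key]
      by_cases hc : PySem.Set.contains (PySem.Set.add closed prev) x = true
      · rw [if_pos hc]
        have hcond : (PySem.Set.contains (PySem.Set.add closed prev) x
            || (badA (x :: xs) || (PySem.Set.add closed prev).any (fun v => oac v x xs))) = true := by
          rw [hc, Bool.true_or]
        rw [if_pos hcond]
      · rw [if_neg hc]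
        have hcb : PySem.Set.contains (PySem.Set.add closed prev) x = false :=
          Bool.eq_false_iff.mpr hc
        rw [hcb, Bool.false_or]
    · have hxp' : x = prev := not_not.mp hxp
      subst hxp'
      rw [show altGo x (x :: xs) closed =
          (if x ≠ x then
            (if PySem.Set.contains (PySem.Set.add closed x) x then 0
             else altGo x xs (PySem.Set.add closed x))
           else altGo x xs closed) from rfl, if_neg (by simp)]
      rw [ih x closed]
      simp [badA, oac]

lemma B_eq_badA (l : List Int) : is_beautiful_alt l = if badA l then 0 else 1 := by
  cases l with
  | nil => simp [is_beautiful_alt, badA]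
  | cons x xs =>
    rw [show is_beautiful_alt (x :: xs) = altGo x xs PySem.Set.empty from rfl, altGo_eq]
    simp [PySem.Set.empty]

-- ===== VERDICT (by name: the statement is the Claim_ definition above) =====
theorem is_beautiful_spec : Claim_equal_is_beautiful := by
  intro l _
  unfold Spec_is_beautiful
  rw [A_eq_badA, B_eq_badA]
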